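-- pv_equiv track=rewrite | github.com/mikhail-dvorkin/competitions | yandex/y2017/warmup/D.py | solve
-- ===== SOURCE A (Python) =====
-- def solve(a):
-- 	n = len(a)
-- 	a = [x % 2 != 0 for x in a]
-- 	for p in range(2):
-- 		des = p == 0
-- 		best = n + 1
-- 		for q in range(2):
-- 			b = a[:]
-- 			ops = 0
-- 			if q:
-- 				b[0] ^= True
-- 				if 1 < n:
-- 					b[1] ^= True
-- 				ops += 1
-- 			for i in range(n - 1):
-- 				if b[i] == (des > 0):
-- 					continue
-- 				ops += 1
-- 				for j in range(i, i + 3):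
-- 					if j == n:
-- 						break
-- 					b[j] ^= True
-- 			if b[n - 1] == des:
-- 				best = min(best, ops)
-- 		yield -1 if best > n else best
-- ===== SOURCE B (Python) =====
-- def solve(a):
--     n = len(a)
--     bits = [x % 2 != 0 for x in a]
--     out = []
--     for des in (True, False):
--         best = n + 1
--         for q in (False, True):
--             ops = 1 if q else 0
--             cur = nxt = q
--             for x in bits[:-1]:
--                 if (x != cur) != des:
--                     ops += 1
--                     cur, nxt = not nxt, True
--                 else:
--                     cur, nxt = nxt, False
--             if (bits[-1] != cur) == des:
--                 best = min(best, ops)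
--         out.append(-1 if best > n else best)
--     return out
-- ===== Notes on version B (the rewrite author's own statement) =====
-- stated objective: simpler
-- what changed: B replaces A's per-candidate array copy and in-place 3-wide (and 2-wide initial) flip mutations by a single forward pass that carries only the two active flip parities (cur, nxt), reading each cell once and never materialising or mutating the array.
import Mathlib
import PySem

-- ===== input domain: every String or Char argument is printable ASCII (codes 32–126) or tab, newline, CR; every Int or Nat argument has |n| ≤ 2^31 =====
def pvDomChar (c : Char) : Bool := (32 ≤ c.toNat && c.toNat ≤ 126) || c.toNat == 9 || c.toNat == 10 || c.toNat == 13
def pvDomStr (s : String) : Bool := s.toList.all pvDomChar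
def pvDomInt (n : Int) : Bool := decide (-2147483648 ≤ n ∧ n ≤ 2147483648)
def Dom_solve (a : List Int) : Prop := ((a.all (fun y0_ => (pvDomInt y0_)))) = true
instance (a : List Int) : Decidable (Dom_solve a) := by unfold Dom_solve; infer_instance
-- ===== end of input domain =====

-- B replaces A's per-try array copy and in-place 3-wide flips by a single pass
-- carrying the two active flip parities (objective: simpler; return value only).

-- ===== PORT A =====
-- Port of A (the generator's yields collected into a list). All index accesses
-- are in range whenever a ≠ [] (Pre_solve); they use .toNat/.getD.
def pvToggle (b : List Bool) (j : Int) : List Bool :=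
  b.set j.toNat (!(b.getD j.toNat false))          -- b[j] ^= True

def pvJStep (n : Int) (s : List Bool × Bool) (j : Int) : List Bool × Bool :=
  if s.2 then s
  else if j = n then (s.1, true)                   -- 'if j == n: break'
  else (pvToggle s.1 j, s.2)

def pvIStep (n : Int) (des : Bool) (s : List Bool × Int) (i : Int) : List Bool × Int :=
  if s.1.getD i.toNat false = des then s           -- 'if b[i] == (des > 0): continue'  (des > 0 = des for a bool)
  else
    (((PySem.List.pyRange i (i + 3) 1).foldl (pvJStep n) (s.1, false)).1, s.2 + 1)

def pvQBody (bits : List Bool) (n : Int) (des : Bool) (best : Int) (q : Int) : Int :=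
  let b0 := bits                                   -- b = a[:]
  let b1 := if q ≠ 0 then (if 1 < n then pvToggle (pvToggle b0 0) 1 else pvToggle b0 0) else b0
  let ops1 : Int := if q ≠ 0 then 1 else 0
  let r := (PySem.List.pyRange 0 (n - 1) 1).foldl (pvIStep n des) (b1, ops1)
  if r.1.getD (n - 1).toNat false = des then min best r.2 else best

def solve (a : List Int) : List Int :=
  let n : Int := a.length
  let bits := a.map (fun x => PySem.Int.mod x 2 != 0)
  (PySem.List.pyRange 0 2 1).map (fun p =>
    let des := p == 0
    let best := (PySem.List.pyRange 0 2 1).foldl (pvQBody bits n des) (n + 1)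
    if best > n then -1 else best)

-- ===== PORT B =====
-- Port of B: one forward pass per (des, q) carrying the active-flip parities
-- (cur, nxt) instead of copying and mutating the array.
def pvAltStep (des : Bool) (s : Int × Bool × Bool) (x : Bool) : Int × Bool × Bool :=
  if (x != s.2.1) ≠ des then (s.1 + 1, !s.2.2, true)
  else (s.1, s.2.2, false)

def pvAltQBody (bits : List Bool) (des : Bool) (best : Int) (q : Bool) : Int :=
  let ops : Int := if q then 1 else 0
  let s := bits.dropLast.foldl (pvAltStep des) (ops, q, q)
  if ((bits.getLastD false != s.2.1) = des) then min best s.1 else best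

def solve_alt (a : List Int) : List Int :=
  let n : Int := a.length
  let bits := a.map (fun x => PySem.Int.mod x 2 != 0)
  [true, false].map (fun des =>
    let best := [false, true].foldl (pvAltQBody bits des) (n + 1)
    if best > n then -1 else best)

-- ===== PRECONDITION & SPEC =====
-- Pre_ excludes only the empty list, on which A raises IndexError (b[0] / b[-1]).
def Pre_solve (a : List Int) : Prop := a ≠ []
instance (a : List Int) : Decidable (Pre_solve a) := by unfold Pre_solve; infer_instance
def pvWitness_solve : List Int := [1, 2, 3]
def Spec_solve (a : List Int) (out : List Int) : Prop := out = solve_alt a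
instance (a : List Int) (out : List Int) : Decidable (Spec_solve a out) := by unfold Spec_solve; infer_instance

-- ===== CLAIM (what is proved, stated in full; the proofs are below) =====
def Claim_equal_solve : Prop := ∀ (a : List Int), Dom_solve a → Pre_solve a → Spec_solve a (solve a)

-- ===== LEMMAS AND PROOFS =====

theorem pv_len_toggle (b : List Bool) (j : Int) : (pvToggle b j).length = b.length := by
  simp [pvToggle]

theorem pv_getD_toggle_self (b : List Bool) (j : Int) (k : Nat) (hj : j.toNat = k)
    (h : k < b.length) : (pvToggle b j).getD k false = !(b.getD k false) := by
  subst hj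
  simp [pvToggle, List.getD_eq_getElem?_getD, h]

theorem pv_getD_toggle_ne (b : List Bool) (j : Int) (m : Nat) (h : j.toNat ≠ m) :
    (pvToggle b j).getD m false = b.getD m false := by
  simp [pvToggle, List.getD_eq_getElem?_getD, h]

theorem pv_bne_not (a c : Bool) : (!(a != c)) = (a != !c) := by
  cases a <;> cases c <;> rfl

theorem pv_getLastD_eq (l : List Bool) (d : Bool) (h : l ≠ []) :
    l.getLastD d = l.getD (l.length - 1) d := by
  cases l with
  | nil => simp at h
  | cons a as =>
      simp [List.getLastD_eq_getLast?, List.getLast?_eq_getElem?, List.getD_eq_getElem?_getD]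

theorem pv_jloop_eq (n : Int) (b : List Bool) (i : Int) (h1 : i + 1 < n) :
    ((PySem.List.pyRange i (i + 3) 1).foldl (pvJStep n) (b, false)).1 =
      if i + 2 = n then pvToggle (pvToggle b i) (i + 1)
      else pvToggle (pvToggle (pvToggle b i) (i + 1)) (i + 2) := by
  rw [PySem.List.pyRange_one_cons (by omega), PySem.List.pyRange_one_cons (by omega),
      PySem.List.pyRange_one_cons (by omega), PySem.List.pyRange_one_eq_nil (by omega)]
  by_cases h2 : i + 2 = n
  · simp [pvJStep, h2, show i ≠ n by omega, show i + 1 ≠ n by omega]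
    rw [if_pos (show i + 1 + 1 = n by omega)]
  · simp [pvJStep, h2, show i ≠ n by omega, show i + 1 ≠ n by omega]
    rw [if_neg (show ¬ i + 1 + 1 = n by omega), show (i + 1 + 1 : Int) = i + 2 from by ring]

theorem pv_mainInv (des : Bool) :
    ∀ (suf bits b : List Bool) (i0 : Nat) (ops : Int) (cur nxt : Bool),
      bits.drop i0 = suf → suf ≠ [] → b.length = bits.length →
      b.getD i0 false = (bits.getD i0 false != cur) →
      (i0 + 1 < bits.length → b.getD (i0 + 1) false = (bits.getD (i0 + 1) false != nxt)) →
      (∀ j : Nat, i0 + 2 ≤ j → j < bits.length → b.getD j false = bits.getD j false) →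
      ((PySem.List.pyRange (i0 : Int) ((bits.length : Int) - 1) 1).foldl
          (pvIStep (bits.length : Int) des) (b, ops)).2
        = (suf.dropLast.foldl (pvAltStep des) (ops, cur, nxt)).1 ∧
      ((PySem.List.pyRange (i0 : Int) ((bits.length : Int) - 1) 1).foldl
          (pvIStep (bits.length : Int) des) (b, ops)).1.getD (bits.length - 1) false
        = (bits.getD (bits.length - 1) false
            != (suf.dropLast.foldl (pvAltStep des) (ops, cur, nxt)).2.1) := by
  intro suf
  induction suf with
  | nil => intro bits b i0 ops cur nxt _ hne; exact absurd rfl hne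
  | cons x xs IH =>
    intro bits b i0 ops cur nxt hdrop hne hlen H0 H1 H2
    have hlb : i0 + 1 + xs.length = bits.length := by
      have h := congrArg List.length hdrop
      simp [List.length_drop] at h
      omega
    have hx : bits.getD i0 false = x := by
      have h0 : (bits.drop i0)[0]? = some x := by rw [hdrop]; rfl
      rw [List.getElem?_drop] at h0
      simp only [Nat.add_zero] at h0
      simp [List.getD_eq_getElem?_getD, h0]
    have hdrop' : bits.drop (i0 + 1) = xs := by rw [← List.tail_drop, hdrop]; rfl
    cases xs with
    | nil =>
      simp only [List.length_nil] at hlb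
      rw [PySem.List.pyRange_one_eq_nil (by omega)]
      rw [show ([x].dropLast : List Bool) = [] from rfl]
      simp only [List.foldl_nil]
      exact ⟨by trivial, by rw [show bits.length - 1 = i0 by omega]; exact H0⟩
    | cons y rest =>
      simp only [List.length_cons] at hlb
      have h2len : i0 + 2 ≤ bits.length := by omega
      rw [PySem.List.pyRange_one_cons (by omega), List.foldl_cons,
          List.dropLast_cons₂, List.foldl_cons]
      have hbi : b.getD i0 false = (x != cur) := by rw [H0, hx]
      have hc1 : ((i0 : Int) + 1) = ((i0 + 1 : Nat) : Int) := by push_cast; ring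
      by_cases hc : (x != cur) = des
      · have hA : pvIStep (bits.length : Int) des (b, ops) (i0 : Int) = (b, ops) := by
          unfold pvIStep
          rw [if_pos (by simpa using (show b.getD i0 false = des from by rw [hbi, hc]))]
        have hB : pvAltStep des (ops, cur, nxt) x = (ops, nxt, false) := by
          unfold pvAltStep
          rw [if_neg (by simp [hc])]
        rw [hA, hB, hc1]
        refine IH bits b (i0 + 1) ops nxt false hdrop' (by simp) hlen (H1 (by omega)) ?_ ?_
        · intro h
          have e : i0 + 1 + 1 = i0 + 2 := by omega
          rw [e, H2 (i0 + 2) (by omega) (by omega)]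
          simp
        · intro j hj hjl; exact H2 j (by omega) hjl
      · have hA : pvIStep (bits.length : Int) des (b, ops) (i0 : Int) =
            (((PySem.List.pyRange (i0 : Int) ((i0 : Int) + 3) 1).foldl
                (pvJStep (bits.length : Int)) (b, false)).1, ops + 1) := by
          unfold pvIStep
          rw [if_neg (by simpa using (show ¬ b.getD i0 false = des from by rw [hbi]; exact hc))]
        have hB : pvAltStep des (ops, cur, nxt) x = (ops + 1, !nxt, true) := by
          unfold pvAltStep
          rw [if_pos (by simp [hc])]
        rw [hA, hB, pv_jloop_eq _ _ _ (by omega)]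
        have hc2 : ((i0 : Int) + 2) = ((i0 + 2 : Nat) : Int) := by push_cast; ring
        rw [hc1, hc2]
        by_cases he : i0 + 2 = bits.length
        · rw [if_pos (by omega)]
          set b' := pvToggle (pvToggle b (i0 : Int)) ((i0 + 1 : Nat) : Int) with hb'
          have hlen' : b'.length = bits.length := by
            rw [hb', pv_len_toggle, pv_len_toggle, hlen]
          have H0' : b'.getD (i0 + 1) false = (bits.getD (i0 + 1) false != !nxt) := by
            rw [hb', pv_getD_toggle_self _ _ _ (by omega) (by rw [pv_len_toggle, hlen]; omega),
                pv_getD_toggle_ne _ _ _ (by omega), H1 (by omega), pv_bne_not]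
          refine IH bits b' (i0 + 1) (ops + 1) (!nxt) true hdrop' (by simp) hlen' H0'
            (fun h => absurd h (by omega)) (fun j hj hjl => absurd hjl (by omega))
        · rw [if_neg (by omega)]
          set b' := pvToggle (pvToggle (pvToggle b (i0 : Int)) ((i0 + 1 : Nat) : Int))
              ((i0 + 2 : Nat) : Int) with hb'
          have hlen' : b'.length = bits.length := by
            rw [hb', pv_len_toggle, pv_len_toggle, pv_len_toggle, hlen]
          have H0' : b'.getD (i0 + 1) false = (bits.getD (i0 + 1) false != !nxt) := by
            rw [hb', pv_getD_toggle_ne _ _ _ (by omega),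
                pv_getD_toggle_self _ _ _ (by omega) (by rw [pv_len_toggle, hlen]; omega),
                pv_getD_toggle_ne _ _ _ (by omega), H1 (by omega), pv_bne_not]
          have H1' : i0 + 1 + 1 < bits.length →
              b'.getD (i0 + 1 + 1) false = (bits.getD (i0 + 1 + 1) false != true) := by
            intro h
            have e : i0 + 1 + 1 = i0 + 2 := by omega
            rw [e, hb',
                pv_getD_toggle_self _ _ _ (by omega)
                  (by rw [pv_len_toggle, pv_len_toggle, hlen]; omega),
                pv_getD_toggle_ne _ _ _ (by omega),
                pv_getD_toggle_ne _ _ _ (by omega), H2 (i0 + 2) (by omega) (by omega)]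
            simp
          have H2' : ∀ j : Nat, i0 + 1 + 2 ≤ j → j < bits.length →
              b'.getD j false = bits.getD j false := by
            intro j hj hjl
            rw [hb', pv_getD_toggle_ne _ _ _ (by omega),
                pv_getD_toggle_ne _ _ _ (by omega),
                pv_getD_toggle_ne _ _ _ (by omega)]
            exact H2 j (by omega) hjl
          exact IH bits b' (i0 + 1) (ops + 1) (!nxt) true hdrop' (by simp) hlen' H0' H1' H2'

theorem pv_qbody_zero (bits : List Bool) (des : Bool) (hne : bits ≠ []) (best : Int) :
    pvQBody bits (bits.length : Int) des best 0 = pvAltQBody bits des best false := by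
  have hpos : 0 < bits.length := List.length_pos_of_ne_nil hne
  obtain ⟨e1, e2⟩ := pv_mainInv des bits bits bits 0 0 false false (by simp) hne rfl
    (by simp) (fun _ => by simp) (fun _ _ _ => rfl)
  rw [Nat.cast_zero] at e1 e2
  unfold pvQBody pvAltQBody
  simp only [if_neg (by norm_num : ¬ (0 : Int) ≠ 0), if_neg (Bool.false_ne_true)]
  rw [show ((bits.length : Int) - 1).toNat = bits.length - 1 by omega, e2, e1,
      pv_getLastD_eq _ _ hne]

theorem pv_qbody_one (bits : List Bool) (des : Bool) (hne : bits ≠ []) (best : Int) :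
    pvQBody bits (bits.length : Int) des best 1 = pvAltQBody bits des best true := by
  have hpos : 0 < bits.length := List.length_pos_of_ne_nil hne
  have key : ∀ b1 : List Bool, b1.length = bits.length →
      b1.getD 0 false = (bits.getD 0 false != true) →
      (1 < bits.length → b1.getD 1 false = (bits.getD 1 false != true)) →
      (∀ j : Nat, 2 ≤ j → j < bits.length → b1.getD j false = bits.getD j false) →
      (if (((PySem.List.pyRange 0 ((bits.length : Int) - 1) 1).foldl
              (pvIStep (bits.length : Int) des) (b1, 1)).1.getD
            ((bits.length : Int) - 1).toNat false = des)
        then min best ((PySem.List.pyRange 0 ((bits.length : Int) - 1) 1).foldl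
              (pvIStep (bits.length : Int) des) (b1, 1)).2 else best)
        = pvAltQBody bits des best true := by
    intro b1 hlen' h0 h1 h2
    obtain ⟨e1, e2⟩ := pv_mainInv des bits bits b1 0 1 true true (by simp) hne hlen' h0
      (fun h => h1 h) (fun j hj hjl => h2 j hj hjl)
    rw [Nat.cast_zero] at e1 e2
    unfold pvAltQBody
    rw [show ((bits.length : Int) - 1).toNat = bits.length - 1 by omega, e2, e1,
        pv_getLastD_eq _ _ hne]
    norm_num
  unfold pvQBody
  simp only [if_pos (by norm_num : (1 : Int) ≠ 0)]
  by_cases hl : 1 < bits.length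
  · have hl' : (1 : Int) < (bits.length : Int) := by exact_mod_cast hl
    rw [if_pos hl']
    refine key _ (by rw [pv_len_toggle, pv_len_toggle]) ?_ ?_ ?_
    · rw [pv_getD_toggle_ne _ _ _ (by omega),
          pv_getD_toggle_self _ _ _ (by omega) hpos]
      simp
    · intro h
      rw [pv_getD_toggle_self _ _ _ (by omega) (by rw [pv_len_toggle]; omega),
          pv_getD_toggle_ne _ _ _ (by omega)]
      simp
    · intro j hj hjl
      rw [pv_getD_toggle_ne _ _ _ (by omega), pv_getD_toggle_ne _ _ _ (by omega)]
  · have hl' : ¬ (1 : Int) < (bits.length : Int) := by exact_mod_cast hl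
    rw [if_neg hl']
    refine key _ (by rw [pv_len_toggle]) ?_ ?_ ?_
    · rw [pv_getD_toggle_self _ _ _ (by omega) hpos]
      simp
    · intro h; exact absurd h hl
    · intro j hj hjl; exact absurd hjl (by omega)

-- ===== VERDICT (by name: the statement is the Claim_ definition above) =====
theorem solve_spec : Claim_equal_solve := by
  intro a _ hpre
  unfold Spec_solve solve solve_alt
  have hbne : (a.map (fun x => PySem.Int.mod x 2 != 0)) ≠ [] := by simpa using hpre
  have hln : (a.length : Int) = ((a.map (fun x => PySem.Int.mod x 2 != 0)).length : Int) := by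
    simp
  rw [show PySem.List.pyRange 0 2 1 = [0, 1] from by decide]
  simp only [List.map_cons, List.map_nil, List.foldl_cons, List.foldl_nil, hln]
  rw [pv_qbody_zero _ _ hbne, pv_qbody_one _ _ hbne,
      pv_qbody_zero _ _ hbne, pv_qbody_one _ _ hbne]
  norm_num [show ((1 : Int) == 0) = false from by decide, show ((0 : Int) == 0) = true from by decide]
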